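-- pv_equiv track=rewrite | github.com/devbisme/KiPart | kipart/kipart.py | read_symbol_rows
-- ===== SOURCE A (Python) =====
-- def read_symbol_rows(rows, ignore_blank_rows=False):
--     """
--     Group CSV rows into separate symbols based on blank lines.
--
--     In the input format, symbols are separated by blank lines. Each symbol consists
--     of a part name in the first row, optional properties in subsequent rows, followed
--     by a header row for pin data, and then the pin definitions.
--
--     Args:
--         rows (list of list): Raw CSV rows from the input file.
--         ignore_blank_rows: Skips blank rows rather than starting a new symbol.
--
--     Returns:
--         list of list: List of symbol data, where each item is a list of rows for a symbol.
--
--     Raises: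
--         ValueError: If no valid symbols are found in the input data.
--     """
--     symbols = []
--
--     current_symbol_rows = []
--     for row in rows:
--         if not row or all(cell.strip() == "" for cell in row):
--             if not ignore_blank_rows:
--                 if current_symbol_rows:
--                     symbols.append(current_symbol_rows)
--                 current_symbol_rows = []
--         else:
--             current_symbol_rows.append(row)
--
--     if current_symbol_rows:
--         symbols.append(current_symbol_rows)
--
--     if not symbols:
--         raise ValueError("No valid symbols found in input file")
--
--     return symbols
-- ===== SOURCE B (Python) =====
-- def read_symbol_rows(rows, ignore_blank_rows=False):
--     def blank(row):
--         return not row or all(cell.strip() == "" for cell in row)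
--
--     if ignore_blank_rows:
--         kept = [row for row in rows if not blank(row)]
--         symbols = [kept] if kept else []
--     else:
--         # peel maximal runs of non-blank rows off the front of the remainder
--         symbols = []
--         rest = rows
--         while rest:
--             if blank(rest[0]):
--                 rest = rest[1:]
--             else:
--                 j = 1
--                 while j < len(rest) and not blank(rest[j]):
--                     j += 1
--                 symbols.append(rest[:j])
--                 rest = rest[j:]
--
--     if not symbols:
--         raise ValueError("No valid symbols found in input file")
--     return symbols
-- ===== Notes on version B (the rewrite author's own statement) =====
-- stated objective: alternative
-- what changed: B replaces A's accumulator loop (current_symbol_rows built row by row, flushed on blank rows and at the end) with run-peeling: the ignore_blank_rows case becomes a single filter, and otherwise whole maximal non-blank runs are sliced off the front of the remaining rows one symbol at a time.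
import Mathlib
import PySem

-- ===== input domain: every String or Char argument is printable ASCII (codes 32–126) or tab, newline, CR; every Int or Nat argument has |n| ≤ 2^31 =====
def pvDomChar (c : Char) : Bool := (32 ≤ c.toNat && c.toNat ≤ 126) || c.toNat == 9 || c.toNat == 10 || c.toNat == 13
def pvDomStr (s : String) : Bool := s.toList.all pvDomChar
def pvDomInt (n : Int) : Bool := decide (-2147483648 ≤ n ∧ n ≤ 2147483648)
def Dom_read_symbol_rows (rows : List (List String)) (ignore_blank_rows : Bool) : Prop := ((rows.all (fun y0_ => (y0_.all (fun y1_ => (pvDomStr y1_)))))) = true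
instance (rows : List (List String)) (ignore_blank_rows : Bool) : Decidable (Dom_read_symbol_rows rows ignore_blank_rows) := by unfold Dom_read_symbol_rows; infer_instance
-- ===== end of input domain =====

-- B replaces A's row-by-row accumulator with run-peeling (a filter / slicing whole
-- non-blank runs off the front); objective: alternative decomposition, not speed.

-- ===== PORT A =====
-- `not row or all(cell.strip() == "" for cell in row)` — shared blank-row predicate
def pvBlank (row : List String) : Bool :=
  row.isEmpty || row.all (fun cell => PySem.Str.strip cell == "")

-- the `for row in rows` loop over state (symbols, current_symbol_rows)
def pvALoop (ignore_blank_rows : Bool) (rows : List (List String))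
    (symbols : List (List (List String))) (cur : List (List String)) :
    List (List (List String)) × List (List String) :=
  match rows with
  | [] => (symbols, cur)
  | row :: rs =>
    if pvBlank row then
      if !ignore_blank_rows then
        pvALoop ignore_blank_rows rs (if cur.isEmpty then symbols else symbols ++ [cur]) []
      else
        pvALoop ignore_blank_rows rs symbols cur
    else
      pvALoop ignore_blank_rows rs symbols (cur ++ [row])

def read_symbol_rows (rows : List (List String)) (ignore_blank_rows : Bool) : List (List (List String)) :=
  let p := pvALoop ignore_blank_rows rows [] []
  -- final `if current_symbol_rows: symbols.append(...)`
  if p.2.isEmpty then p.1 else p.1 ++ [p.2]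
  -- `raise ValueError` when symbols is empty: excluded by Pre_read_symbol_rows

-- ===== PORT B =====
-- the `while rest:` loop: peel blank heads, or slice off rest[:j]/rest[j:] where j is
-- the end of the maximal non-blank run (rest[:j] = head :: takeWhile, rest[j:] = dropWhile)
def pvSplit (rows : List (List String)) : List (List (List String)) :=
  match rows with
  | [] => []
  | row :: rest =>
    if pvBlank row then pvSplit rest
    else (row :: rest.takeWhile (fun r => !pvBlank r)) ::
         pvSplit (rest.dropWhile (fun r => !pvBlank r))
termination_by rows.length
decreasing_by
  · simp
  · exact Nat.lt_succ_of_le (List.length_dropWhile_le _ _)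

def read_symbol_rows_alt (rows : List (List String)) (ignore_blank_rows : Bool) : List (List (List String)) :=
  if ignore_blank_rows then
    let kept := rows.filter (fun r => !pvBlank r)
    if kept.isEmpty then [] else [kept]
    -- `raise ValueError` when kept/symbols is empty: excluded by Pre_read_symbol_rows
  else
    pvSplit rows

-- ===== PRECONDITION & SPEC =====
-- A raises ValueError exactly when every row is blank (no symbol found); excluded.
def Pre_read_symbol_rows (rows : List (List String)) (ignore_blank_rows : Bool) : Prop :=
  rows.any (fun r => !pvBlank r) = true
instance (rows : List (List String)) (ignore_blank_rows : Bool) : Decidable (Pre_read_symbol_rows rows ignore_blank_rows) := by unfold Pre_read_symbol_rows; infer_instance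

def pvWitness_read_symbol_rows : List (List String) × Bool := ([[" "], ["R1"], [""], ["R2", "x"]], false)

def Spec_read_symbol_rows (rows : List (List String)) (ignore_blank_rows : Bool) (out : List (List (List String))) : Prop := out = read_symbol_rows_alt rows ignore_blank_rows
instance (rows : List (List String)) (ignore_blank_rows : Bool) (out : List (List (List String))) : Decidable (Spec_read_symbol_rows rows ignore_blank_rows out) := by unfold Spec_read_symbol_rows; infer_instance

-- ===== CLAIM (what is proved, stated in full; the proofs are below) =====
def Claim_equal_read_symbol_rows : Prop := ∀ (rows : List (List String)) (ignore_blank_rows : Bool), Dom_read_symbol_rows rows ignore_blank_rows → Pre_read_symbol_rows rows ignore_blank_rows → Spec_read_symbol_rows rows ignore_blank_rows (read_symbol_rows rows ignore_blank_rows)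

-- ===== LEMMAS AND PROOFS =====

-- head test used to phrase the loop invariant
def pvHeadNB (rows : List (List String)) : Bool :=
  match rows with
  | [] => false
  | r :: _ => !pvBlank r

theorem pvSplit_of_headNB (rows : List (List String)) (h : pvHeadNB rows = true) :
    pvSplit rows = (rows.takeWhile (fun r => !pvBlank r)) ::
      pvSplit (rows.dropWhile (fun r => !pvBlank r)) := by
  match rows with
  | [] => simp [pvHeadNB] at h
  | r :: rs =>
    simp [pvHeadNB] at h
    simp [pvSplit, h]

theorem pv_take_drop_of_not_headNB (rows : List (List String)) (h : pvHeadNB rows = false) :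
    rows.takeWhile (fun r => !pvBlank r) = [] ∧ rows.dropWhile (fun r => !pvBlank r) = rows := by
  match rows with
  | [] => simp
  | r :: rs =>
    simp [pvHeadNB] at h
    simp [h]

-- main invariant for ignore_blank_rows = false
theorem pvALoop_false_eq (rows : List (List String)) :
    ∀ (symbols : List (List (List String))) (cur : List (List String)),
    (let p := pvALoop false rows symbols cur
     if p.2.isEmpty then p.1 else p.1 ++ [p.2]) =
    symbols ++ (if pvHeadNB rows then
        (cur ++ rows.takeWhile (fun r => !pvBlank r)) ::
          pvSplit (rows.dropWhile (fun r => !pvBlank r))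
      else (if cur.isEmpty then [] else [cur]) ++ pvSplit rows) := by
  induction rows with
  | nil =>
    intro symbols cur
    simp only [pvALoop, pvHeadNB, pvSplit]
    cases cur <;> simp
  | cons row rs ih =>
    intro symbols cur
    by_cases hb : pvBlank row = true
    · have step : pvALoop false (row :: rs) symbols cur =
        pvALoop false rs (if cur.isEmpty then symbols else symbols ++ [cur]) [] := by
        simp [pvALoop, hb]
      rw [step, ih]
      have hsplit : pvSplit (row :: rs) = pvSplit rs := by simp [pvSplit, hb]
      have hHNB : pvHeadNB (row :: rs) = false := by simp [pvHeadNB, hb]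
      by_cases hrs : pvHeadNB rs = true
      · rw [pvSplit_of_headNB rs hrs]
        simp [hHNB, hsplit, hrs, pvSplit_of_headNB rs hrs]
        cases cur <;> simp
      · simp only [hrs]
        simp [hHNB, hsplit]
        cases cur <;> simp
    · have hnb : pvBlank row = false := by simpa using hb
      have step : pvALoop false (row :: rs) symbols cur =
        pvALoop false rs symbols (cur ++ [row]) := by
        simp [pvALoop, hnb]
      rw [step, ih]
      have hHNB : pvHeadNB (row :: rs) = true := by simp [pvHeadNB, hnb]
      simp only [hHNB, List.takeWhile_cons, List.dropWhile_cons, hnb]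
      by_cases hrs : pvHeadNB rs = true
      · simp [hrs]
      · have hrs' : pvHeadNB rs = false := by simpa using hrs
        obtain ⟨ht, hd⟩ := pv_take_drop_of_not_headNB rs hrs'
        simp [hrs', ht, hd]

-- invariant for ignore_blank_rows = true: the loop just filters
theorem pvALoop_true_eq (rows : List (List String)) :
    ∀ (symbols : List (List (List String))) (cur : List (List String)),
    pvALoop true rows symbols cur = (symbols, cur ++ rows.filter (fun r => !pvBlank r)) := by
  induction rows with
  | nil => intro symbols cur; simp [pvALoop]
  | cons row rs ih =>
    intro symbols cur
    by_cases hb : pvBlank row = true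
    · simp [pvALoop, hb, ih]
    · have hnb : pvBlank row = false := by simpa using hb
      simp [pvALoop, hnb, ih]

-- ===== VERDICT (by name: the statement is the Claim_ definition above) =====
theorem read_symbol_rows_spec : Claim_equal_read_symbol_rows := by
  intro rows ib _ _
  unfold Spec_read_symbol_rows read_symbol_rows read_symbol_rows_alt
  cases ib with
  | false =>
    simp only [Bool.false_eq_true, if_false]
    rw [pvALoop_false_eq rows [] []]
    by_cases hrs : pvHeadNB rows = true
    · rw [pvSplit_of_headNB rows hrs]
      simp [hrs]
    · simp [hrs]
  | true =>
    rw [pvALoop_true_eq rows [] []]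
    simp
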